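-- pv_equiv track=rewrite | github.com/jordanmcdonald724-dev/AgentForgeOS | backend/services/architecture_engine.py | _map_agents
-- ===== SOURCE A (Python) =====
-- from typing import Dict, List
--
-- def _map_agents(system_type: str, platform: str) -> List[str]:
--     agents: List[str] = ["planner_agent"]
--
--     if platform == "unity":
--         agents.append("unity_planner_agent")
--     elif platform == "unreal":
--         agents.append("unreal_planner_agent")
--
--     if system_type == "backend":
--         agents.append("planner_agent")
--
--     # Deduplicate while preserving order
--     seen = set()
--     ordered = []
--     for agent in agents:
--         if agent not in seen:
--             seen.add(agent)
--             ordered.append(agent)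
--     return ordered
-- ===== SOURCE B (Python) =====
-- from typing import List
--
-- def _map_agents(system_type: str, platform: str) -> List[str]:
--     # Direct construction: the list is always ["planner_agent"] plus an optional
--     # platform agent; the backend re-append is always removed by A's dedup,
--     # so no seen-set or second pass is needed.
--     extra: List[str] = []
--     if platform == "unity":
--         extra = ["unity_planner_agent"]
--     elif platform == "unreal":
--         extra = ["unreal_planner_agent"]
--     return ["planner_agent"] + extra
-- ===== Notes on version B (the rewrite author's own statement) =====
-- stated objective: simpler
-- what changed: Replaces build-then-dedup (append list, backend re-append, seen-set dedup pass) with direct construction of the final list, since the only possible duplicate is the backend re-append which the dedup always removes.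
import Mathlib
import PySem

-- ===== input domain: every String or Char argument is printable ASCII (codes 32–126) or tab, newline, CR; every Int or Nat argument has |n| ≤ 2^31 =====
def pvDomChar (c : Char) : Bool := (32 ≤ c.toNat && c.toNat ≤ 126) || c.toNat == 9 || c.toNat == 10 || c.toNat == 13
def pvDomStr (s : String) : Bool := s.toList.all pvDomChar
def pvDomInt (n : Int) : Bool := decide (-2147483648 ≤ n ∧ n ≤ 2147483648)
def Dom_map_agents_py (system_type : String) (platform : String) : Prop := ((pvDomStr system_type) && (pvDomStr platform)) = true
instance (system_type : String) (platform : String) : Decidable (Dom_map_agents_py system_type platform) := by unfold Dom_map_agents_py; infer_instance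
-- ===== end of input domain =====

-- B replaces A's build-then-dedup (backend re-append + seen-set pass) with
-- direct construction of the same list (objective: simpler).

-- ===== PORT A =====
def map_agents_py (system_type : String) (platform : String) : List String :=
  let agents : List String := ["planner_agent"]
  let agents := if platform = "unity" then agents ++ ["unity_planner_agent"]
    else if platform = "unreal" then agents ++ ["unreal_planner_agent"]
    else agents
  let agents := if system_type = "backend" then agents ++ ["planner_agent"] else agents
  -- dedup loop: seen = set(), ordered = []
  let r := agents.foldl (fun (acc : PySem.Set String × List String) agent =>
    if agent ∈ acc.1 then acc else (PySem.Set.add acc.1 agent, acc.2 ++ [agent]))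
    ((PySem.Set.ofList []), [])
  r.2

-- ===== PORT B =====
def map_agents_py_alt (system_type : String) (platform : String) : List String :=
  let extra : List String :=
    if platform = "unity" then ["unity_planner_agent"]
    else if platform = "unreal" then ["unreal_planner_agent"]
    else []
  ["planner_agent"] ++ extra

-- ===== PRECONDITION & SPEC =====
def Spec_map_agents_py (system_type : String) (platform : String) (out : List String) : Prop := out = map_agents_py_alt system_type platform
instance (system_type : String) (platform : String) (out : List String) : Decidable (Spec_map_agents_py system_type platform out) := by unfold Spec_map_agents_py; infer_instance

-- ===== CLAIM (what is proved, stated in full; the proofs are below) =====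
def Claim_equal_map_agents_py : Prop := ∀ (system_type : String) (platform : String), Dom_map_agents_py system_type platform → Spec_map_agents_py system_type platform (map_agents_py system_type platform)

-- ===== LEMMAS AND PROOFS =====

-- ===== VERDICT (by name: the statement is the Claim_ definition above) =====
theorem map_agents_py_spec : Claim_equal_map_agents_py := by
  intro system_type platform _
  unfold Spec_map_agents_py map_agents_py map_agents_py_alt
  split_ifs <;> rfl
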